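-- pv_equiv track=rewrite | github.com/MetaMetricsInc/loadlamb | loadlamb/utils.py | grouper
-- ===== SOURCE A (Python) =====
-- import itertools
--
-- def grouper(n, total):
--     iterable = range(total)
--     def grouper_g(n,iterable):
--         it = iter(iterable)
--         while True:
--            chunk = tuple(itertools.islice(it, n))
--            if not chunk:
--                return
--            yield len(chunk)
--     return list(grouper_g(n,iterable))
-- ===== SOURCE B (Python) =====
-- def grouper(n, total):
--     # Arithmetic: total//n full chunks of size n plus one remainder chunk.
--     if n <= 0 or total <= 0:
--         return []
--     q, r = divmod(total, n)
--     return [n] * q + ([r] if r else [])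
-- ===== Notes on version B (the rewrite author's own statement) =====
-- stated objective: faster
-- what changed: Replaces the generator that materialises range(total) and slices it chunk by chunk with a closed-form divmod computation building [n]*(total//n) plus the remainder.
import Mathlib
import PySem

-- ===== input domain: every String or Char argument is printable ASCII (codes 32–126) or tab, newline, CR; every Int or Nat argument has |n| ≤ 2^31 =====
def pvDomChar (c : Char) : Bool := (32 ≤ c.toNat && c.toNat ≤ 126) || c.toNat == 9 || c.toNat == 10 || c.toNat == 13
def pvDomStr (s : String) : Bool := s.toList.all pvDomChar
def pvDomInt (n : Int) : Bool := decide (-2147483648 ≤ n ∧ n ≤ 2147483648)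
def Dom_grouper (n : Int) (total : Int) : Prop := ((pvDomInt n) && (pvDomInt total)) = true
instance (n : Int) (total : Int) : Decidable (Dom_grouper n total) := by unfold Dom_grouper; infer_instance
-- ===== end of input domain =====

-- B replaces A's generator slicing range(total) chunk by chunk with a closed-form divmod: asymptotically faster.


-- ===== PORT A =====
-- the generator's while-loop: chunk = tuple(islice(it, n)); stop on an empty chunk,
-- otherwise yield len(chunk) and continue on the rest of the iterator
def grouperGo (n : Nat) (it : List Int) : List Int :=
  if it.take n = [] then []
  else ((it.take n).length : Int) :: grouperGo n (it.drop n)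
termination_by it.length
decreasing_by
  rename_i h
  rcases it with _ | ⟨x, xs⟩
  · simp at h
  · rcases n with _ | m
    · simp at h
    · simp only [List.length_drop, List.length_cons]
      omega

-- islice's count must be a nonnegative int; for n < 0 Python raises ValueError (outside
-- Pre_grouper), so the .toNat clamp is never exercised on admitted inputs.
def grouper (n : Int) (total : Int) : List Int :=
  grouperGo n.toNat (PySem.List.pyRange 0 total 1)

-- ===== PORT B =====
def grouper_alt (n : Int) (total : Int) : List Int :=
  if n ≤ 0 ∨ total ≤ 0 then []
  else
    let q := PySem.Int.floordiv total n
    let r := PySem.Int.mod total n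
    List.replicate q.toNat n ++ (if r = 0 then [] else [r])

-- ===== PRECONDITION & SPEC =====
-- A raises ValueError for n < 0 (islice rejects a negative stop); Pre_ excludes exactly those.
def Pre_grouper (n : Int) (total : Int) : Prop := 0 ≤ n
instance (n : Int) (total : Int) : Decidable (Pre_grouper n total) := by unfold Pre_grouper; infer_instance
def pvWitness_grouper : Int × Int := (3, 10)

def Spec_grouper (n : Int) (total : Int) (out : List Int) : Prop := out = grouper_alt n total
instance (n : Int) (total : Int) (out : List Int) : Decidable (Spec_grouper n total out) := by unfold Spec_grouper; infer_instance

-- ===== CLAIM (what is proved, stated in full; the proofs are below) =====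
def Claim_equal_grouper : Prop := ∀ (n : Int) (total : Int), Dom_grouper n total → Pre_grouper n total → Spec_grouper n total (grouper n total)

-- ===== LEMMAS AND PROOFS =====

-- closed form of the chunking loop for a positive chunk size
theorem grouperGo_eq (n : Nat) (hn : 1 ≤ n) (it : List Int) :
    grouperGo n it =
      List.replicate (it.length / n) (n : Int) ++
        (if it.length % n = 0 then [] else [((it.length % n : Nat) : Int)]) := by
  induction it using grouperGo.induct n with
  | case1 it hchunk =>
    have hit : it = [] := by
      rcases it with _ | ⟨x, xs⟩
      · rfl
      · exfalso; rcases n with _ | m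
        · omega
        · simp at hchunk
    subst hit
    rw [grouperGo]; simp
  | case2 it hchunk ih =>
    have hit : it ≠ [] := by intro h; subst h; simp at hchunk
    rw [grouperGo, if_neg hchunk]
    by_cases hle : n ≤ it.length
    · have hlen : (it.take n).length = n := by simp [Nat.min_eq_left hle]
      have hdrop : (it.drop n).length = it.length - n := by simp
      have hdiv : it.length / n = (it.length - n) / n + 1 :=
        Nat.div_eq_sub_div (by omega) hle
      have hmod : it.length % n = (it.length - n) % n := Nat.mod_eq_sub_mod hle
      rw [ih, hdrop, hlen, hdiv, hmod, List.replicate_succ]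
      simp
    · push_neg at hle
      have hlen : (it.take n).length = it.length := by
        simp [Nat.min_eq_right (le_of_lt hle)]
      have hpos : 0 < it.length := List.length_pos_iff.mpr hit
      have hdrop : it.drop n = [] := List.drop_eq_nil_of_le (le_of_lt hle)
      rw [ih, hdrop]
      have hdiv : it.length / n = 0 := Nat.div_eq_of_lt hle
      have hmod : it.length % n = it.length := Nat.mod_eq_of_lt hle
      simp [hlen, hdiv, hmod]
      omega

theorem grouper_main (n total : Int) (hn : 0 ≤ n) :
    grouper n total = grouper_alt n total := by
  unfold grouper grouper_alt
  by_cases h0 : n ≤ 0 ∨ total ≤ 0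
  · rw [if_pos h0]
    rcases h0 with h | h
    · have hn0 : n = 0 := le_antisymm h hn
      subst hn0
      rw [grouperGo]; simp
    · rw [PySem.List.pyRange_one_eq_nil (by omega), grouperGo]; simp
  · push_neg at h0
    obtain ⟨hnpos, htpos⟩ := h0
    rw [if_neg (by push_neg; exact ⟨hnpos, htpos⟩)]
    have hn1 : 1 ≤ n.toNat := by omega
    rw [grouperGo_eq n.toNat hn1]
    have hlen : (PySem.List.pyRange 0 total 1).length = total.toNat := by
      rw [PySem.List.length_pyRange_one]; congr 1; omega
    rw [hlen]
    have h2 : ((n.toNat : Nat) : Int) = n := Int.toNat_of_nonneg hn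
    have hfd : PySem.Int.floordiv total n = ((total.toNat / n.toNat : Nat) : Int) := by
      rw [PySem.Int.floordiv_eq_ediv_of_pos hnpos, Int.natCast_div, h2,
        Int.toNat_of_nonneg (le_of_lt htpos)]
    have hmd : PySem.Int.mod total n = ((total.toNat % n.toNat : Nat) : Int) := by
      rw [PySem.Int.mod_eq_emod_of_pos hnpos, Int.natCast_mod, h2,
        Int.toNat_of_nonneg (le_of_lt htpos)]
    rw [hfd, hmd, h2]
    simp only [Int.toNat_natCast]
    by_cases hr : total.toNat % n.toNat = 0
    · simp [hr]
    · rw [if_neg hr, if_neg (by exact_mod_cast hr)]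

-- ===== VERDICT =====
theorem grouper_spec : Claim_equal_grouper := by
  intro n total _ hpre
  exact grouper_main n total hpre
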